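-- pv_equiv track=rewrite | github.com/qiancai/ai-pr-translator | scripts/diff_analyzer.py | find_containing_section
-- ===== SOURCE A (Python) =====
-- def find_containing_section(line_num, all_headers):
--     """Find which section a line belongs to"""
--     current_section = None
--     for header_line_num in sorted(all_headers.keys()):
--         if header_line_num <= line_num:
--             current_section = header_line_num
--         else:
--             break
--     return current_section
-- ===== SOURCE B (Python) =====
-- import bisect
--
--
-- def find_containing_section(line_num, all_headers):
--     """Find which section a line belongs to (binary search on the sorted keys)."""
--     sorted_keys = sorted(all_headers)
--     idx = bisect.bisect_right(sorted_keys, line_num)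
--     return sorted_keys[idx - 1] if idx > 0 else None
-- ===== Notes on version B (the rewrite author's own statement) =====
-- stated objective: alternative
-- what changed: Replaces the linear scan-and-break over the sorted keys by a bisect_right binary search for the boundary, returning the predecessor key directly; the O(n log n) sort still dominates, so overall runtime is similar.
import Mathlib
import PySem

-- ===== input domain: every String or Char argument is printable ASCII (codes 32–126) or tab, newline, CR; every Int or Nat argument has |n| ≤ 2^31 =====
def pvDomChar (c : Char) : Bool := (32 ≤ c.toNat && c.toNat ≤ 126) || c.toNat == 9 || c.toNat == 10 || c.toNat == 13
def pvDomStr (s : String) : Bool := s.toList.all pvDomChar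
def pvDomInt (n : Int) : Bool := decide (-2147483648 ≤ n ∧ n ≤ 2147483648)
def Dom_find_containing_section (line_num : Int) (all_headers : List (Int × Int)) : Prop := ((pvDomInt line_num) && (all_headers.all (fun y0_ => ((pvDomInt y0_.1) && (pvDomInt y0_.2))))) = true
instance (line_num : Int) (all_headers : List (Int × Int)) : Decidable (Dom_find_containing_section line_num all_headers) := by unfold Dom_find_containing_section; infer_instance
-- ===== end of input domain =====

-- ===== PORT A =====
-- B replaces A's linear scan-and-break over the sorted keys by a bisect_right binary search for the boundary (alternative algorithm; the sort still dominates the cost).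
-- Loop of A: for header_line_num in sorted keys: if <= line_num, update current_section, else break.
def pvLoopA (line_num : Int) : Option Int → List Int → Option Int
  | cur, [] => cur
  | cur, k :: ks => if k ≤ line_num then pvLoopA line_num (some k) ks else cur

def find_containing_section (line_num : Int) (all_headers : List (Int × Int)) : Option Int :=
  pvLoopA line_num none (PySem.List.sorted (all_headers.map Prod.fst) (fun k => k))

-- ===== PORT B =====
def find_containing_section_alt (line_num : Int) (all_headers : List (Int × Int)) : Option Int :=
  let sorted_keys := PySem.List.sorted (all_headers.map Prod.fst) (fun k => k)
  let idx := PySem.List.bisectRight sorted_keys line_num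
  -- sorted_keys[idx - 1]: idx > 0 and idx ≤ len, so the index is in range; getD is exact here
  if idx > 0 then some (sorted_keys.getD (idx - 1) 0) else none

-- ===== PRECONDITION & SPEC =====
def Spec_find_containing_section (line_num : Int) (all_headers : List (Int × Int)) (out : Option Int) : Prop := out = find_containing_section_alt line_num all_headers
instance (line_num : Int) (all_headers : List (Int × Int)) (out : Option Int) : Decidable (Spec_find_containing_section line_num all_headers out) := by unfold Spec_find_containing_section; infer_instance

-- ===== CLAIM (what is proved, stated in full; the proofs are below) =====
def Claim_equal_find_containing_section : Prop := ∀ (line_num : Int) (all_headers : List (Int × Int)), Dom_find_containing_section line_num all_headers → Spec_find_containing_section line_num all_headers (find_containing_section line_num all_headers)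

-- ===== LEMMAS AND PROOFS =====
-- A's scan-and-break, characterised by any boundary index n: all keys before n are ≤ line_num,
-- all keys from n on are > line_num; then the loop returns the key at n-1 (or cur if n = 0).
theorem pvLoopA_eq (x : Int) (ks : List Int) (cur : Option Int) (n : Nat)
    (hn : n ≤ ks.length)
    (h1 : ∀ (j : Nat) (hj : j < ks.length), j < n → ks[j] ≤ x)
    (h2 : ∀ (j : Nat) (hj : j < ks.length), n ≤ j → x < ks[j]) :
    pvLoopA x cur ks = if h : 0 < n then some (ks[n-1]'(by omega)) else cur := by
  induction ks generalizing cur n with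
  | nil =>
    have : n = 0 := by simpa using hn
    subst this
    simp [pvLoopA]
  | cons k ks ih =>
    cases n with
    | zero =>
      have hk : x < k := h2 0 (by simp) (by omega)
      simp [pvLoopA, not_le.mpr hk]
    | succ m =>
      have hk : k ≤ x := h1 0 (by simp) (by omega)
      have := ih (some k) m (by simpa using hn)
        (fun j hj hjm => by simpa using h1 (j+1) (by simpa using hj) (by omega))
        (fun j hj hmj => by simpa using h2 (j+1) (by simpa using hj) (by omega))
      simp only [pvLoopA, if_pos hk, this]
      cases m with
      | zero => simp
      | succ l => simp

-- ===== VERDICT (by name: the statement is the Claim_ definition above) =====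
theorem find_containing_section_spec : Claim_equal_find_containing_section := by
  intro line_num all_headers _
  unfold Spec_find_containing_section find_containing_section find_containing_section_alt
  set ks := PySem.List.sorted (all_headers.map Prod.fst) (fun k => k) with hks
  obtain ⟨hle, h1, h2⟩ := PySem.List.bisectRight_spec ks line_num
    (by rw [hks]; exact PySem.List.sorted_pairwise _ _)
  rw [pvLoopA_eq line_num ks none (PySem.List.bisectRight ks line_num) hle h1 h2]
  set n := PySem.List.bisectRight ks line_num with hn
  by_cases h0 : 0 < n
  · rw [dif_pos h0, if_pos h0]
    congr 1
    rw [List.getD_eq_getElem ks 0 (by omega)]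
  · rw [dif_neg h0, if_neg h0]
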